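-- pv_equiv track=rewrite | github.com/g4brielsol/toc | trab_1_read_txt.py | checar_espaco
-- ===== SOURCE A (Python) =====
-- def checar_espaco(string: str, posicao_inicial: int):
--     """
--         checa se os espacos foram colocados corretamente
--     """
--     # string sem o numero inicial digitado pelo usuario
--     string_comeco = string[posicao_inicial:]
--     erro = False
--     espaco = True
--     for i in range(len(string_comeco)):
--         # retorna erro caso o indice correspondente ao espaco nao seja espaco
--         if espaco == True:
--             # espaco vira false porque na proxima iteracao nao e espaco
--             espaco = False
--             if string_comeco[i] != " ":
--                 erro = True
--                 return erro
--             else: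
--                 pass
--         else:
--             # a proxima iteracao da string deve ser espaco
--             espaco = True
--     return erro
-- ===== SOURCE B (Python) =====
-- def checar_espaco(string: str, posicao_inicial: int):
--     tail = string[posicao_inicial:]
--     return not all(c == " " for c in tail[::2])
-- ===== Notes on version B (the rewrite author's own statement) =====
-- stated objective: simpler
-- what changed: Replaces the index loop with its toggling 'espaco' flag and early return by an extended step-2 slice tail[::2] plus a single short-circuiting all() over it.
import Mathlib
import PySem

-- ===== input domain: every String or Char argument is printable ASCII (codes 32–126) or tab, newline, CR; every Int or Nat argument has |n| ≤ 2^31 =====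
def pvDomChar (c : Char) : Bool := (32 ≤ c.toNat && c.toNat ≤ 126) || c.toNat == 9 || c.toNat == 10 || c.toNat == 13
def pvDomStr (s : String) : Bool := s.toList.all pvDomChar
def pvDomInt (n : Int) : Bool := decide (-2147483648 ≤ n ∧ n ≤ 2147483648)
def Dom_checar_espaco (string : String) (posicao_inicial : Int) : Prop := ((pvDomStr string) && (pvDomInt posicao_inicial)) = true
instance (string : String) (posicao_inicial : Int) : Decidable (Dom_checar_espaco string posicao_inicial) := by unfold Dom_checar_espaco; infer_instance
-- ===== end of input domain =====

-- B drops A's toggling 'espaco' flag and early-return index loop for a step-2 slice plus one all() check (objective: simpler).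

-- ===== PORT A =====
-- index loop 'for i in range(len(string_comeco))' with the toggling flag and early return
def checarLoop (cs : List Char) (espaco : Bool) (i : Nat) : Bool :=
  if h : i < cs.length then
    if espaco = true then
      if cs[i] ≠ ' ' then true
      else checarLoop cs false (i + 1)
    else checarLoop cs true (i + 1)
  else false
termination_by cs.length - i

def checar_espaco (string : String) (posicao_inicial : Int) : Bool :=
  let string_comeco := PySem.Str.slice string (some posicao_inicial) none
  checarLoop string_comeco.toList true 0

-- ===== PORT B =====
def checar_espaco_alt (string : String) (posicao_inicial : Int) : Bool :=
  let tail := PySem.Str.slice string (some posicao_inicial) none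
  let even := (PySem.List.slice? tail.toList none none 2).getD []
  !(even.all (fun c => c == ' '))

-- ===== PRECONDITION & SPEC =====
def Spec_checar_espaco (string : String) (posicao_inicial : Int) (out : Bool) : Prop := out = checar_espaco_alt string posicao_inicial
instance (string : String) (posicao_inicial : Int) (out : Bool) : Decidable (Spec_checar_espaco string posicao_inicial out) := by unfold Spec_checar_espaco; infer_instance

-- ===== CLAIM (what is proved, stated in full; the proofs are below) =====
def Claim_equal_checar_espaco : Prop := ∀ (string : String) (posicao_inicial : Int), Dom_checar_espaco string posicao_inicial → Spec_checar_espaco string posicao_inicial (checar_espaco string posicao_inicial)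

-- ===== LEMMAS AND PROOFS =====

-- structural twin of A's loop (consumes the list instead of indexing)
def chkA : List Char → Bool → Bool
  | [], _ => false
  | c :: rest, esp => if esp then (if c ≠ ' ' then true else chkA rest false) else chkA rest true

theorem checarLoop_eq_chkA (cs : List Char) (esp : Bool) (i : Nat) :
    checarLoop cs esp i = chkA (cs.drop i) esp := by
  induction esp, i using checarLoop.induct (cs := cs) with
  | case1 i h hc =>
      rw [checarLoop, List.drop_eq_getElem_cons h]
      simp_all [chkA]
  | case2 i h hc ih =>
      rw [checarLoop, List.drop_eq_getElem_cons h]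
      simp_all [chkA]
  | case3 esp i h hesp ih =>
      rw [checarLoop, List.drop_eq_getElem_cons h]
      simp_all [chkA]
  | case4 esp i h =>
      rw [checarLoop]
      rw [List.drop_eq_nil_of_le (by omega)]
      simp [chkA, h]

-- the characters at even offsets, two at a time
def everyOther : List Char → List Char
  | [] => []
  | [a] => [a]
  | a :: _ :: t => a :: everyOther t

theorem chkA_eq_everyOther (cs : List Char) :
    chkA cs true = !((everyOther cs).all (fun c => c == ' ')) := by
  induction cs using everyOther.induct with
  | case1 => rw [everyOther]; simp [chkA]
  | case2 a => rw [everyOther]; by_cases h : a = ' ' <;> simp [chkA, h]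
  | case3 a b t ih => rw [everyOther]; by_cases h : a = ' ' <;> simp [chkA, h, ih]

theorem filterMap_range_everyOther (cs : List Char) :
    (List.range ((cs.length + 1) / 2)).filterMap (fun k => cs[2 * k]?) = everyOther cs := by
  induction cs using everyOther.induct with
  | case1 => rw [everyOther]; simp
  | case2 a => rw [everyOther]; simp [List.range_succ]
  | case3 a b t ih =>
      rw [everyOther]
      have hlen : ((a :: b :: t).length + 1) / 2 = (t.length + 1) / 2 + 1 := by
        simp; omega
      rw [hlen, List.range_succ_eq_map]
      simp only [List.filterMap_cons, Nat.mul_zero, List.getElem?_cons_zero,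
        List.filterMap_map]
      rw [← ih]
      congr 1

theorem slice?_two (cs : List Char) :
    PySem.List.slice? cs none none 2 = some (everyOther cs) := by
  rw [← filterMap_range_everyOther]
  simp only [PySem.List.slice?, PySem.List.sliceIndices]
  norm_num
  by_cases h0 : cs.length = 0
  · simp [h0]
  · rw [if_pos (by omega)]
    have h2 : ((cs.length : Int) + 2 - 1) / 2 = ((cs.length + 1 : Nat) : Int) / ((2 : Nat) : Int) := by
      push_cast; ring_nf
    rw [h2, ← Int.natCast_div, Int.toNat_natCast]
    apply List.filterMap_congr
    intro k _
    have h3 : ((2 : Int) * (k : Int)).toNat = 2 * k := by omega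
    rw [h3]

-- ===== VERDICT (by name: the statement is the Claim_ definition above) =====
theorem checar_espaco_spec : Claim_equal_checar_espaco := by
  intro s p _
  unfold Spec_checar_espaco checar_espaco checar_espaco_alt
  dsimp only
  rw [slice?_two]
  simp only [Option.getD_some]
  rw [checarLoop_eq_chkA, List.drop_zero, chkA_eq_everyOther]
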